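-- pv_equiv track=rewrite | github.com/insightn777/algorithmStudy | boj_2164/solve.py | solve
-- ===== SOURCE A (Python) =====
-- from queue import Queue
--
-- def solve(n: int) -> int:
--     if n == 1:
--         return 1
--     elif n == 2:
--         return 2
--
--     q = Queue()
--     for i in range(0, n+1, 2):
--         q.put_nowait(i)
--
--     if (n % 2 == 0):
--         q.get_nowait()
--
--     card: int
--     while q:
--         card = q.get_nowait()
--         if q.empty():
--             return card
--         else:
--             q.put_nowait(q.get_nowait())
-- ===== SOURCE B (Python) =====
-- def solve(n: int) -> int:
--     if n == 1:
--         return 1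
--     p = 1 << (n.bit_length() - 1)
--     return n if p == n else 2 * (n - p)
-- ===== Notes on version B (the rewrite author's own statement) =====
-- stated objective: faster
-- what changed: Replaces the queue simulation (discard front, rotate next) with the Josephus closed form: the survivor is n when n is a power of two, else 2*(n - largest power of two below n), computed via bit_length.
import Mathlib
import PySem

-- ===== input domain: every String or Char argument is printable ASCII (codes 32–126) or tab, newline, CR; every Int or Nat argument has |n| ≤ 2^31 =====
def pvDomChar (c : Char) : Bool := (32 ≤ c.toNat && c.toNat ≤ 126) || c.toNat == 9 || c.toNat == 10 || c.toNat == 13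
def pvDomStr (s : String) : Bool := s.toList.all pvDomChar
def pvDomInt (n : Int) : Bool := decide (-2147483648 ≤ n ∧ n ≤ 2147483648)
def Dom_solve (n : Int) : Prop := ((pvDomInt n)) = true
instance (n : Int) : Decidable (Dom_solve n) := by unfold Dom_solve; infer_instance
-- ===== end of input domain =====

-- B replaces A's O(n) queue simulation by the Josephus closed form via bit_length (measurably faster).


-- ===== PORT A =====
-- the while-loop of A: pop the front card; if the queue is then empty return it,
-- else move the next card to the back ([] is unreachable inside Pre_, junk 0 there — Python raises)
def loopA : List Int → Int
  | [] => 0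
  | [c] => c
  | _ :: x :: rest => loopA (rest ++ [x])
termination_by l => l.length
decreasing_by simp

def solve (n : Int) : Int :=
  if n = 1 then 1
  else if n = 2 then 2
  else
    let q := PySem.List.pyRange 0 (n + 1) 2
    let q := if PySem.Int.mod n 2 = 0 then q.tail else q
    loopA q

-- ===== PORT B =====
def solve_alt (n : Int) : Int :=
  if n = 1 then 1
  else
    let p : Int := (1 : Int) <<< (PySem.Int.bitLength n - 1)
    if p = n then n else 2 * (n - p)

-- ===== PRECONDITION & SPEC =====
-- Pre_: n ≥ 1 (the number of cards); for n ≤ 0 the Python A raises queue.Empty.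
def Pre_solve (n : Int) : Prop := 1 ≤ n
instance (n : Int) : Decidable (Pre_solve n) := by unfold Pre_solve; infer_instance
def pvWitness_solve : Int := 5

def Spec_solve (n : Int) (out : Int) : Prop := out = solve_alt n
instance (n : Int) (out : Int) : Decidable (Spec_solve n out) := by unfold Spec_solve; infer_instance

-- ===== CLAIM (what is proved, stated in full; the proofs are below) =====
def Claim_equal_solve : Prop := ∀ (n : Int), Dom_solve n → Pre_solve n → Spec_solve n (solve n)

-- ===== LEMMAS AND PROOFS =====

-- 0-based index of the surviving element of a queue of length m under A's discard/rotate loop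
def idx : Nat → Nat
  | 0 => 0
  | 1 => 0
  | (m + 2) => if idx (m + 1) = m then 1 else idx (m + 1) + 2

lemma idx_lt : ∀ m : Nat, 0 < m → idx m < m := by
  intro m
  induction m with
  | zero => omega
  | succ k ih =>
    intro _
    match k, ih with
    | 0, _ => simp [idx]
    | (j + 1), ih =>
      have h := ih (by omega)
      show idx (j + 2) < j + 2
      rw [idx]
      split <;> omega

lemma loopA_getD : ∀ l : List Int, l ≠ [] → loopA l = l.getD (idx l.length) 0 := by
  intro l
  induction l using loopA.induct with
  | case1 => simp
  | case2 c => intro _; simp [loopA, idx]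
  | case3 c x rest ih =>
    intro _
    have hne : rest ++ [x] ≠ [] := by simp
    have hlen : (rest ++ [x]).length = rest.length + 1 := by simp
    have hj := idx_lt (rest.length + 1) (by omega)
    rw [loopA, ih hne, hlen]
    show (rest ++ [x]).getD (idx (rest.length + 1)) 0
        = (c :: x :: rest).getD (idx (rest.length + 2)) 0
    rw [idx]
    by_cases h : idx (rest.length + 1) = rest.length
    · simp [h, List.getD]
    · rw [if_neg h]
      have hlt : idx (rest.length + 1) < rest.length := by omega
      simp [List.getD, List.getElem?_append_left hlt]

-- closed form for idx
lemma log2_eq (m k : Nat) (h1 : 2 ^ k ≤ m) (h2 : m < 2 ^ (k + 1)) : Nat.log2 m = k := by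
  rw [Nat.log2_eq_log_two]; exact Nat.log_eq_of_pow_le_of_lt_pow h1 h2

lemma idx_closed : ∀ m : Nat, 1 ≤ m →
    idx m = if 2 ^ Nat.log2 m = m then m - 1 else 2 * (m - 2 ^ Nat.log2 m) - 1 := by
  intro m
  induction m with
  | zero => omega
  | succ k ih =>
    intro _
    match k, ih with
    | 0, _ => decide
    | (j + 1), ih =>
      have ihv := ih (by omega)
      have hle : 2 ^ Nat.log2 (j + 1) ≤ j + 1 := Nat.log2_self_le (by omega)
      have hlt : j + 1 < 2 ^ (Nat.log2 (j + 1) + 1) := Nat.lt_log2_self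
      have hsucc1 : 2 ^ (Nat.log2 (j + 1) + 1) = 2 ^ Nat.log2 (j + 1) * 2 := pow_succ 2 _
      show idx (j + 2) = _
      rw [idx, ihv]
      by_cases hpow : 2 ^ Nat.log2 (j + 1) = j + 1
      · -- j+1 is a power of two: idx (j+1) = j, so idx (j+2) = 1
        rw [if_pos hpow, if_pos (show j + 1 - 1 = j by omega)]
        rcases Nat.eq_zero_or_pos j with hj0 | hj0
        · subst hj0; decide
        have hone : 1 ≤ 2 ^ Nat.log2 (j + 1) := Nat.one_le_two_pow
        have h2 : 2 ≤ 2 ^ Nat.log2 (j + 1) := by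
          rcases Nat.eq_zero_or_pos (Nat.log2 (j + 1)) with h0 | h0
          · exfalso; rw [h0] at hpow; simp at hpow; omega
          · have : (2:Nat) ^ 1 ≤ 2 ^ Nat.log2 (j + 1) := Nat.pow_le_pow_right (by omega) h0
            simpa using this
        have hlog : Nat.log2 (j + 2) = Nat.log2 (j + 1) := by
          apply log2_eq
          · omega
          · omega
        rw [hlog, hpow, if_neg (by omega)]
        omega
      · rw [if_neg hpow]
        have hj1 : 1 ≤ j := by
          by_contra h
          have h0 : j = 0 := by omega
          subst h0
          exact hpow (by decide)
        by_cases hpow2 : 2 ^ Nat.log2 (j + 2) = j + 2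
        · -- j+2 is a power of two: idx (j+1) = j-1, so idx (j+2) = j+1
          have hle2 : 2 ^ Nat.log2 (j + 2) ≤ j + 2 := Nat.log2_self_le (by omega)
          have hlt2 : j + 2 < 2 ^ (Nat.log2 (j + 2) + 1) := Nat.lt_log2_self
          have ht1 : 1 ≤ Nat.log2 (j + 2) := by
            by_contra h
            have h0 : Nat.log2 (j + 2) = 0 := by omega
            rw [h0] at hpow2; simp at hpow2
          have hpred : Nat.log2 (j + 2) - 1 + 1 = Nat.log2 (j + 2) := by omega
          have hsucc2 : 2 ^ Nat.log2 (j + 2) = 2 ^ (Nat.log2 (j + 2) - 1) * 2 := by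
            conv_lhs => rw [← hpred]
            exact pow_succ 2 _
          have hone : 1 ≤ 2 ^ (Nat.log2 (j + 2) - 1) := Nat.one_le_two_pow
          have hlog : Nat.log2 (j + 1) = Nat.log2 (j + 2) - 1 := by
            apply log2_eq
            · omega
            · rw [hpred]; omega
          have hval : 2 * (j + 1 - 2 ^ Nat.log2 (j + 1)) - 1 = j - 1 := by
            rw [hlog]; omega
          rw [if_neg (show ¬ (2 * (j + 1 - 2 ^ Nat.log2 (j + 1)) - 1 = j) by omega),
              if_pos hpow2]
          omega
        · -- neither a power of two: same leading power, idx grows by 2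
          rw [if_neg hpow2]
          have haux : ¬ (j + 2 = 2 ^ (Nat.log2 (j + 1) + 1)) := by
            intro h
            apply hpow2
            have hsucc3 : 2 ^ (Nat.log2 (j + 1) + 1 + 1) = 2 ^ (Nat.log2 (j + 1) + 1) * 2 :=
              pow_succ 2 _
            have hl : Nat.log2 (j + 2) = Nat.log2 (j + 1) + 1 := by
              apply log2_eq
              · omega
              · omega
            rw [hl]; omega
          have hlog : Nat.log2 (j + 2) = Nat.log2 (j + 1) := by
            apply log2_eq
            · omega
            · omega
          rw [hlog]
          have hcond : ¬ (2 * (j + 1 - 2 ^ Nat.log2 (j + 1)) - 1 = j) := by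
            intro h
            have hnp : j + 1 = 2 * 2 ^ Nat.log2 (j + 1) ∨ j + 2 = 2 * 2 ^ Nat.log2 (j + 1) := by
              omega
            rcases hnp with h1 | h2
            · omega
            · exact haux (by omega)
          rw [if_neg hcond]
          omega

-- the bit p = 1 << (bitLength n - 1) in B is 2^(log2 n) for n ≥ 1
lemma pow_bitLength (n : Int) (h : 1 ≤ n) :
    (1 : Int) <<< (PySem.Int.bitLength n - 1) = ((2 ^ Nat.log2 n.toNat : Nat) : Int) := by
  have h1 := PySem.Int.two_pow_bitLength_le n (by omega)
  have h2 := PySem.Int.lt_two_pow_bitLength n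
  have hb1 : 1 ≤ PySem.Int.bitLength n := by
    by_contra hb
    have : PySem.Int.bitLength n = 0 := by omega
    rw [this] at h2; simp at h2; omega
  have habs : n.natAbs = n.toNat := by omega
  have hlog : Nat.log2 n.toNat = PySem.Int.bitLength n - 1 := by
    apply log2_eq
    · rw [← habs]; exact h1
    · rw [← habs]
      have : PySem.Int.bitLength n - 1 + 1 = PySem.Int.bitLength n := by omega
      rw [this]; exact h2
  rw [hlog, Int.shiftLeft_eq]
  push_cast; ring

-- getD of a mapped range
lemma getD_map_range' (f : Nat → Int) (m j : Nat) (hj : j < m) :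
    ((List.range m).map f).getD j 0 = f j := by
  rw [List.getD_eq_getElem _ _ (by simpa using hj)]
  simp

-- the queue A builds, as a mapped range
lemma q_eq (n : Int) (h : 3 ≤ n) :
    PySem.List.pyRange 0 (n + 1) 2
      = (List.range (n.toNat / 2 + 1)).map (fun i : Nat => 2 * (i : Int)) := by
  rw [PySem.List.pyRange_of_pos 0 (n + 1) (by omega)]
  have hif : (if (0 : Int) < n + 1 then ((n + 1 - 0 + 2 - 1) / 2).toNat else 0)
      = n.toNat / 2 + 1 := by
    rw [if_pos (by omega)]
    have : n + 1 - 0 + 2 - 1 = n + 2 := by ring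
    rw [this]
    omega
  rw [hif]
  apply List.map_congr_left
  intro i _
  ring

theorem solve_eq_alt (n : Int) (hn : 1 ≤ n) : solve n = solve_alt n := by
  by_cases h1 : n = 1
  · simp [solve, solve_alt, h1]
  by_cases h2 : n = 2
  · subst h2; decide
  have h3 : 3 ≤ n := by omega
  have hp := pow_bitLength n hn
  have hLle : 2 ^ Nat.log2 n.toNat ≤ n.toNat := Nat.log2_self_le (by omega)
  have hLlt : n.toNat < 2 ^ (Nat.log2 n.toNat + 1) := Nat.lt_log2_self
  have h2L : 2 ^ (Nat.log2 n.toNat + 1) = 2 ^ Nat.log2 n.toNat * 2 := pow_succ 2 _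
  have hBalt : solve_alt n = if ((2 ^ Nat.log2 n.toNat : Nat) : Int) = n then n
      else 2 * (n - ((2 ^ Nat.log2 n.toNat : Nat) : Int)) := by
    simp only [solve_alt, if_neg h1, hp]
  rw [hBalt]
  simp only [solve, if_neg h1, if_neg h2, q_eq n h3]
  by_cases hev : PySem.Int.mod n 2 = 0
  · -- n even: the queue after the first pop is [2, 4, …, n], length n/2
    rw [if_pos hev]
    have hdvd : (2 : Int) ∣ n := (PySem.Int.mod_eq_zero_iff_dvd n 2).mp hev
    have hnt : n.toNat % 2 = 0 := by omega
    have htail : ((List.range (n.toNat / 2 + 1)).map (fun i : Nat => 2 * (i : Int))).tail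
        = (List.range (n.toNat / 2)).map (fun i : Nat => 2 * ((i : Int) + 1)) := by
      rw [List.range_succ_eq_map]
      simp [Function.comp_def]
    rw [htail, loopA_getD _ (by simp; omega)]
    simp only [List.length_map, List.length_range]
    rw [getD_map_range' _ _ _ (idx_lt _ (by omega)), idx_closed _ (by omega)]
    have hmle : 2 ^ Nat.log2 (n.toNat / 2) ≤ n.toNat / 2 := Nat.log2_self_le (by omega)
    have hmlt : n.toNat / 2 < 2 ^ (Nat.log2 (n.toNat / 2) + 1) := Nat.lt_log2_self
    have hm2 : 2 ^ (Nat.log2 (n.toNat / 2) + 1) = 2 ^ Nat.log2 (n.toNat / 2) * 2 := pow_succ 2 _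
    have hLm : Nat.log2 n.toNat = Nat.log2 (n.toNat / 2) + 1 := by
      apply log2_eq
      · omega
      · have : 2 ^ (Nat.log2 (n.toNat / 2) + 1 + 1) = 2 ^ (Nat.log2 (n.toNat / 2) + 1) * 2 :=
          pow_succ 2 _
        omega
    rw [hLm] at hBalt ⊢ hLle hLlt h2L
    split_ifs with hA hB hB <;> omega
  · -- n odd: the queue is [0, 2, …, n-1], length (n+1)/2
    rw [if_neg hev]
    have hnd : ¬ (2 : Int) ∣ n := fun h => hev ((PySem.Int.mod_eq_zero_iff_dvd n 2).mpr h)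
    have hnt : n.toNat % 2 = 1 := by omega
    rw [loopA_getD _ (by simp)]
    simp only [List.length_map, List.length_range]
    rw [getD_map_range' _ _ _ (idx_lt _ (by omega)), idx_closed _ (by omega)]
    have hmle : 2 ^ Nat.log2 (n.toNat / 2 + 1) ≤ n.toNat / 2 + 1 := Nat.log2_self_le (by omega)
    have hmlt : n.toNat / 2 + 1 < 2 ^ (Nat.log2 (n.toNat / 2 + 1) + 1) := Nat.lt_log2_self
    have hm2 : 2 ^ (Nat.log2 (n.toNat / 2 + 1) + 1) = 2 ^ Nat.log2 (n.toNat / 2 + 1) * 2 :=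
      pow_succ 2 _
    by_cases hA : 2 ^ Nat.log2 (n.toNat / 2 + 1) = n.toNat / 2 + 1
    · -- (n+1)/2 a power of two: 2^log2 n = (n+1)/2, the survivor is n - 1
      have hLm : Nat.log2 n.toNat = Nat.log2 (n.toNat / 2 + 1) := by
        apply log2_eq
        · omega
        · omega
      rw [if_pos hA, hLm]
      split_ifs with hB <;> omega
    · -- (n+1)/2 not a power of two: 2^log2 n = 2 * 2^log2((n+1)/2)
      have hLm : Nat.log2 n.toNat = Nat.log2 (n.toNat / 2 + 1) + 1 := by
        apply log2_eq
        · omega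
        · have : 2 ^ (Nat.log2 (n.toNat / 2 + 1) + 1 + 1)
              = 2 ^ (Nat.log2 (n.toNat / 2 + 1) + 1) * 2 := pow_succ 2 _
          omega
      rw [if_neg hA, hLm]
      rw [hLm] at hLle hLlt h2L
      split_ifs with hB <;> omega

-- ===== VERDICT (by name: the statement is the Claim_ definition above) =====
theorem solve_spec : Claim_equal_solve := by
  intro n _ hpre
  unfold Spec_solve
  exact solve_eq_alt n hpre
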